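-- pv_equiv track=rewrite | github.com/adlvdl/nonogram_app | nonogram/hint_engine.py | compute_col_hints
-- ===== SOURCE A (Python) =====
-- def compute_col_hints(grid: list[list[bool]]) -> list[list[int]]:
--     """Return a list of hint sequences, one per column.
--
--     Each hint sequence is the run-length encoding of filled cells in that column.
--     An all-empty column returns [0] to represent a blank clue.
--     """
--     if not grid:
--         return []
--
--     num_cols = len(grid[0])
--     columns: list[list[bool]] = [
--         [grid[row_idx][col_idx] for row_idx in range(len(grid))]
--         for col_idx in range(num_cols)
--     ]
--     return [_run_length_encode(col) for col in columns]
--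
-- def _run_length_encode(line: list[bool]) -> list[int]:
--     """Return run lengths of True values in sequence order.
--
--     Returns [0] when no filled cells exist, matching nonogram convention
--     for an empty row or column.
--     """
--     hints: list[int] = []
--     current_run = 0
--
--     for filled in line:
--         if filled:
--             current_run += 1
--         elif current_run > 0:
--             hints.append(current_run)
--             current_run = 0
--
--     if current_run > 0:
--         hints.append(current_run)
--
--     return hints if hints else [0]
-- ===== SOURCE B (Python) =====
-- def compute_col_hints(grid: list[list[bool]]) -> list[list[int]]:
--     """One pass in row-major order; per-column run counters, no transpose."""
--     if not grid:
--         return []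
--     num_cols = len(grid[0])
--     runs = [0] * num_cols
--     hints: list[list[int]] = [[] for _ in range(num_cols)]
--     for row_idx in range(len(grid)):
--         for c in range(num_cols):
--             if grid[row_idx][c]:
--                 runs[c] += 1
--             elif runs[c] > 0:
--                 hints[c].append(runs[c])
--                 runs[c] = 0
--     for c in range(num_cols):
--         if runs[c] > 0:
--             hints[c].append(runs[c])
--     return [h if h else [0] for h in hints]
-- ===== Notes on version B (the rewrite author's own statement) =====
-- stated objective: alternative
-- what changed: Replaces the explicit column-transpose plus per-column run-length-encoding pass with a single row-major sweep that maintains one run counter and one hint list per column, flushing counters after the last row; no transposed copy of the grid is built.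
import Mathlib
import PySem

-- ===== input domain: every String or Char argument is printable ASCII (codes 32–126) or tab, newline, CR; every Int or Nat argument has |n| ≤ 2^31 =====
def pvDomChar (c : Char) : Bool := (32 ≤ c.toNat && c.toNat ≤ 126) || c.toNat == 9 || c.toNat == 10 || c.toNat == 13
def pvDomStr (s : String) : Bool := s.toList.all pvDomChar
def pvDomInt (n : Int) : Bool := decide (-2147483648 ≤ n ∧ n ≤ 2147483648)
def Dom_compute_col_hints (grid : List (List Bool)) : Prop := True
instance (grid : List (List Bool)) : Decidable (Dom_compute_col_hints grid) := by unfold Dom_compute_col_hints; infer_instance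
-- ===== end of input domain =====

-- B replaces the transpose-then-encode structure by a single row-major sweep with per-column
-- run counters (objective: alternative decomposition, same cost).

-- ===== PORT A =====
-- _run_length_encode: fold carries (hints, current_run)
def pvRLE (line : List Bool) : List Int :=
  let st := line.foldl
    (fun (st : List Int × Int) (filled : Bool) =>
      if filled then (st.1, st.2 + 1)
      else if st.2 > 0 then (st.1 ++ [st.2], 0) else st)
    ([], 0)
  let hints := if st.2 > 0 then st.1 ++ [st.2] else st.1
  if hints.isEmpty then [0] else hints

def compute_col_hints (grid : List (List Bool)) : List (List Int) :=
  if grid = [] then [] else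
    let num_cols := (grid.headD []).length
    let columns : List (List Bool) :=
      (List.range num_cols).map (fun col_idx =>
        (List.range grid.length).map (fun row_idx =>
          ((grid.getD row_idx []).getD col_idx false)))
    columns.map pvRLE

-- ===== PORT B =====
-- per-cell update of one column's (hints, run) state
def pvStep (st : List Int × Int) (cell : Bool) : List Int × Int :=
  if cell then (st.1, st.2 + 1)
  else if st.2 > 0 then (st.1 ++ [st.2], 0) else st

def compute_col_hints_alt (grid : List (List Bool)) : List (List Int) :=
  if grid = [] then [] else
    let num_cols := (grid.headD []).length
    let init : List (List Int × Int) := List.replicate num_cols ([], 0)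
    let final := (List.range grid.length).foldl
      (fun st row_idx =>
        (List.range num_cols).map (fun c =>
          pvStep (st.getD c ([], 0)) ((grid.getD row_idx []).getD c false)))
      init
    final.map (fun st =>
      let h := if st.2 > 0 then st.1 ++ [st.2] else st.1
      if h.isEmpty then [0] else h)

-- ===== PRECONDITION & SPEC =====
-- Pre_ excludes exactly the ragged grids on which the Python A raises IndexError
-- (some row shorter than the first row); both Pythons raise there.
def Pre_compute_col_hints (grid : List (List Bool)) : Prop :=
  ∀ row ∈ grid, (grid.headD []).length ≤ row.length
instance (grid : List (List Bool)) : Decidable (Pre_compute_col_hints grid) := by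
  unfold Pre_compute_col_hints; infer_instance

def pvWitness_compute_col_hints : List (List Bool) := [[true, false], [true, true]]

def Spec_compute_col_hints (grid : List (List Bool)) (out : List (List Int)) : Prop := out = compute_col_hints_alt grid
instance (grid : List (List Bool)) (out : List (List Int)) : Decidable (Spec_compute_col_hints grid out) := by unfold Spec_compute_col_hints; infer_instance

-- ===== CLAIM (what is proved, stated in full; the proofs are below) =====
def Claim_equal_compute_col_hints : Prop := ∀ (grid : List (List Bool)), Dom_compute_col_hints grid → Pre_compute_col_hints grid → Spec_compute_col_hints grid (compute_col_hints grid)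

-- ===== LEMMAS AND PROOFS =====

-- the c-th column state of B's row fold is A's per-column fold over that column's prefix
theorem pv_fold_col (grid : List (List Bool)) (n : Nat) (rs : List Nat)
    (st : List (List Int × Int)) (c : Nat) (hc : c < n) :
    ((rs.foldl (fun st row_idx =>
        (List.range n).map (fun c =>
          pvStep (st.getD c ([], 0)) ((grid.getD row_idx []).getD c false))) st).getD c ([], 0))
      = (rs.map (fun r => (grid.getD r []).getD c false)).foldl pvStep (st.getD c ([], 0)) := by
  induction rs generalizing st with
  | nil => rfl
  | cons r rs ih =>
    simp only [List.foldl_cons, List.map_cons]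
    rw [ih _, List.getD_eq_getElem?_getD, List.getElem?_map,
      List.getElem?_range hc]
    rfl

theorem pv_fold_len (grid : List (List Bool)) (n : Nat) (rs : List Nat)
    (st : List (List Int × Int)) (hlen : st.length = n) :
    (rs.foldl (fun st row_idx =>
        (List.range n).map (fun c =>
          pvStep (st.getD c ([], 0)) ((grid.getD row_idx []).getD c false))) st).length = n := by
  induction rs generalizing st with
  | nil => exact hlen
  | cons r rs ih => exact ih _ (by simp)

-- ===== VERDICT (by name: the statement is the Claim_ definition above) =====
theorem compute_col_hints_spec : Claim_equal_compute_col_hints := by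
  intro grid _ _
  unfold Spec_compute_col_hints compute_col_hints compute_col_hints_alt
  by_cases hg : grid = []
  · simp [hg]
  · simp only [if_neg hg]
    set n := (grid.headD []).length with hn
    set F := fun (st : List (List Int × Int)) (row_idx : Nat) =>
      (List.range n).map (fun c =>
        pvStep (st.getD c ([], 0)) ((grid.getD row_idx []).getD c false)) with hF
    have hlen : ((List.range grid.length).foldl F (List.replicate n ([], 0))).length = n :=
      pv_fold_len grid n _ _ (by simp)
    apply List.ext_getElem
    · simp [hlen]
    · intro c h1 h2
      have hc : c < n := by simpa using h1
      simp only [List.getElem_map, List.getElem_range]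
      have := pv_fold_col grid n (List.range grid.length) (List.replicate n ([], 0)) c hc
      rw [List.getElem_eq_getD ([], 0), this]
      have hinit : (List.replicate n (([], 0) : List Int × Int)).getD c ([], 0) = ([], 0) := by
        simp [List.getD_eq_getElem?_getD, hc]
      rw [hinit]
      unfold pvRLE
      rfl
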